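-- pv_equiv track=rewrite | github.com/iafiscal1212/iaverso | tools/phase15c_verification.py | build_transition_counts
-- ===== SOURCE A (Python) =====
-- from typing import Dict, List, Tuple, Optional
--
-- def build_transition_counts(assignments: List[int]) -> Dict[int, Dict[int, int]]:
--     """Construye conteos de transición."""
--     counts = {}
--
--     for i in range(len(assignments) - 1):
--         src, dst = assignments[i], assignments[i+1]
--         if src not in counts:
--             counts[src] = {}
--         if dst not in counts[src]:
--             counts[src][dst] = 0
--         counts[src][dst] += 1
--
--     return counts
-- ===== SOURCE B (Python) =====
-- def build_transition_counts(assignments):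
--     """Construye conteos de transición."""
--     # pass 1: flat table of adjacent-pair counts
--     pairs = {}
--     for p in zip(assignments, assignments[1:]):
--         pairs[p] = pairs.get(p, 0) + 1
--     # pass 2: regroup the flat table into the nested dict
--     counts = {}
--     for (src, dst), n in pairs.items():
--         counts.setdefault(src, {})[dst] = n
--     return counts
-- ===== Notes on version B (the rewrite author's own statement) =====
-- stated objective: alternative
-- what changed: A fills the nested dict directly in one index-guarded pass; B first builds a flat counter over zip(assignments, assignments[1:]) and then regroups that flat table into the nested dict in a second pass.
import Mathlib
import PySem

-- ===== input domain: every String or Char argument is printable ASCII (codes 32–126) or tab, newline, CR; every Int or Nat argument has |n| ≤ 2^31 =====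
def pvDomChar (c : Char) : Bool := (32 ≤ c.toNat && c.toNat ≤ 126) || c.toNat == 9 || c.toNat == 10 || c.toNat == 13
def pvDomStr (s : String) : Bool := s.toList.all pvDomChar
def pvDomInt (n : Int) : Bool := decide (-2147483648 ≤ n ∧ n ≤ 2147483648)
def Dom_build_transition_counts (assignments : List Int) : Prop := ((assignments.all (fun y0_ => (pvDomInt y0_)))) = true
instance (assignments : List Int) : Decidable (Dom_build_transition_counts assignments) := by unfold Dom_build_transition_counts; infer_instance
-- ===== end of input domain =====

-- B builds a flat adjacent-pair count table in one pass over zip(assignments, assignments[1:]) and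
-- regroups it into the nested dict in a second pass, instead of A's single guarded pass that fills
-- the nested structure directly (objective: alternative decomposition, same cost).

-- ===== PORT A =====
def build_transition_counts (assignments : List Int) : List (Int × List (Int × Int)) :=
  let counts :=
    (PySem.List.pyRange 0 ((assignments.length : Int) - 1) 1).foldl
      (fun counts i =>
        let src := PySem.List.pyGetD assignments i 0
        let dst := PySem.List.pyGetD assignments (i + 1) 0
        let counts := if counts.contains src then counts else counts.insert src PySem.Dict.empty
        let inner := counts.getD src PySem.Dict.empty
        let inner := if inner.contains dst then inner else inner.insert dst 0
        counts.insert src (inner.insert dst (inner.getD dst 0 + 1)))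
      (PySem.Dict.empty : PySem.Dict Int (PySem.Dict Int Int))
  counts.items.map (fun p => (p.1, p.2.items))

-- ===== PORT B =====
def build_transition_counts_alt (assignments : List Int) : List (Int × List (Int × Int)) :=
  let ps := assignments.zip (PySem.List.slice assignments (some 1) none)
  let pairs := ps.foldl (fun d p => d.insert p (d.getD p 0 + 1))
      (PySem.Dict.empty : PySem.Dict (Int × Int) Int)
  let counts := pairs.items.foldl
      (fun c x =>
        let c := c.setdefault x.1.1 PySem.Dict.empty
        c.insert x.1.1 ((c.getD x.1.1 PySem.Dict.empty).insert x.1.2 x.2))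
      (PySem.Dict.empty : PySem.Dict Int (PySem.Dict Int Int))
  counts.items.map (fun p => (p.1, p.2.items))

-- ===== PRECONDITION & SPEC =====
def Spec_build_transition_counts (assignments : List Int) (out : List (Int × List (Int × Int))) : Prop := out = build_transition_counts_alt assignments
instance (assignments : List Int) (out : List (Int × List (Int × Int))) : Decidable (Spec_build_transition_counts assignments out) := by unfold Spec_build_transition_counts; infer_instance

-- ===== CLAIM (what is proved, stated in full; the proofs are below) =====
def Claim_equal_build_transition_counts : Prop := ∀ (assignments : List Int), Dom_build_transition_counts assignments → Spec_build_transition_counts assignments (build_transition_counts assignments)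

-- ===== LEMMAS AND PROOFS =====
def pvBump (c : PySem.Dict Int (PySem.Dict Int Int)) (p : Int × Int) : PySem.Dict Int (PySem.Dict Int Int) :=
  c.insert p.1 ((c.getD p.1 PySem.Dict.empty).insert p.2 ((c.getD p.1 PySem.Dict.empty).getD p.2 0 + 1))

lemma pvBump_eq (c : PySem.Dict Int (PySem.Dict Int Int)) (s d : Int) :
    (let c1 := if c.contains s then c else c.insert s PySem.Dict.empty
     let inn := c1.getD s PySem.Dict.empty
     let inn2 := if inn.contains d then inn else inn.insert d 0
     c1.insert s (inn2.insert d (inn2.getD d 0 + 1))) = pvBump c (s, d) := by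
  simp only [pvBump]
  by_cases hc : c.contains s
  · simp only [hc, if_true]
    by_cases hd : (c.getD s PySem.Dict.empty).contains d
    · simp [hd]
    · have h0 : (c.getD s PySem.Dict.empty).getD d 0 = 0 :=
        PySem.Dict.getD_of_not_contains _ _ (by simpa using hd)
      simp [hd, h0, PySem.Dict.getD_insert_self, PySem.Dict.insert_insert_self]
  · have h0 : c.getD s PySem.Dict.empty = PySem.Dict.empty :=
      PySem.Dict.getD_of_not_contains _ _ (by simpa using hc)
    simp [hc, h0, PySem.Dict.getD_insert_self, PySem.Dict.insert_insert_self]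

def pvReg (c : PySem.Dict Int (PySem.Dict Int Int)) (x : (Int × Int) × Int) : PySem.Dict Int (PySem.Dict Int Int) :=
  c.insert x.1.1 ((c.getD x.1.1 PySem.Dict.empty).insert x.1.2 x.2)

lemma pvReg_eq (c : PySem.Dict Int (PySem.Dict Int Int)) (x : (Int × Int) × Int) :
    (let c1 := c.setdefault x.1.1 PySem.Dict.empty
     c1.insert x.1.1 ((c1.getD x.1.1 PySem.Dict.empty).insert x.1.2 x.2))
    = c.insert x.1.1 ((c.getD x.1.1 PySem.Dict.empty).insert x.1.2 x.2) := by
  by_cases hc : c.contains x.1.1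
  · simp [PySem.Dict.setdefault_of_contains _ _ hc]
  · have hc' : c.contains x.1.1 = false := by simpa using hc
    have h0 : c.getD x.1.1 PySem.Dict.empty = PySem.Dict.empty :=
      PySem.Dict.getD_of_not_contains _ _ hc'
    simp [PySem.Dict.setdefault_of_not_contains _ _ hc', h0,
      PySem.Dict.getD_insert_self, PySem.Dict.insert_insert_self]

lemma pvZip_eq_range (a : List Int) :
    a.zip (a.drop 1) = (List.range (a.length - 1)).map
      (fun k => (a.getD k 0, a.getD (k + 1) 0)) := by
  induction a with
  | nil => simp
  | cons x xs ih =>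
    cases xs with
    | nil => simp
    | cons y ys =>
      simp only [List.drop_one, List.tail_cons, List.zip_cons_cons, List.length_cons,
        Nat.add_sub_cancel]
      rw [List.range_succ_eq_map]
      simp only [List.map_cons, List.map_map, Function.comp_def, List.getD_cons_zero,
        List.getD_cons_succ]
      have := ih
      simp only [List.drop_one, List.tail_cons, List.length_cons, Nat.add_sub_cancel] at this
      rw [this]
      simp [List.getD_cons_succ]

lemma pvA_fold (a : List Int) :
    build_transition_counts a
      = ((a.zip (a.drop 1)).foldl pvBump PySem.Dict.empty).items.map (fun p => (p.1, p.2.items)) := by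
  have hn : ((a.length : Int) - 1 - 0).toNat = a.length - 1 := by omega
  have hrange : PySem.List.pyRange 0 ((a.length : Int) - 1) 1
      = (List.range (a.length - 1)).map (fun k => ((k : Nat) : Int)) := by
    rw [PySem.List.pyRange_one]
    simp [hn]
  simp only [build_transition_counts, hrange, List.foldl_map]
  rw [pvZip_eq_range, List.foldl_map]
  congr 2
  apply PySem.List.foldl_congr_mem
  intro acc k hk
  have h1 : PySem.List.pyGetD a ((k : Nat) : Int) 0 = a.getD k 0 := by
    simp [PySem.List.pyGetD_natCast]
  have h2 : PySem.List.pyGetD a (((k : Nat) : Int) + 1) 0 = a.getD (k + 1) 0 := by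
    have hc : ((k : Nat) : Int) + 1 = ((k + 1 : Nat) : Int) := by push_cast; ring
    rw [hc, PySem.List.pyGetD_natCast]
  rw [h1, h2]
  simpa using pvBump_eq acc (a.getD k 0) (a.getD (k + 1) 0)

lemma pvB_fold (a : List Int) :
    build_transition_counts_alt a
      = (((PySem.Dict.counter (a.zip (a.drop 1)) : PySem.Dict (Int × Int) Int).items.foldl
          pvReg PySem.Dict.empty).items.map (fun p => (p.1, p.2.items))) := by
  simp only [build_transition_counts_alt, PySem.List.slice_from_one, List.drop_one,
    PySem.Dict.foldl_insert_getD_add_one_eq_counter]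
  congr 2
  apply PySem.List.foldl_congr_mem
  intro acc x hx
  simpa using pvReg_eq acc x

lemma pvGetD_foldl_insert_key {β V : Type} (l : List β) (key : β → Int) (g : V → β → V)
    (d : PySem.Dict Int V) (v0 : V) (s : Int) :
    (l.foldl (fun c x => c.insert (key x) (g (c.getD (key x) v0) x)) d).getD s v0
      = (l.filter (fun x => key x == s)).foldl g (d.getD s v0) := by
  induction l generalizing d with
  | nil => simp
  | cons x xs ih =>
    rw [List.foldl_cons, ih]
    by_cases h : key x = s
    · simp [List.filter_cons, h, PySem.Dict.getD_insert_self]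
    · simp [List.filter_cons, h, PySem.Dict.getD_insert_of_ne _ _ _ (Ne.symm h)]

lemma pvOfList_filter {α : Type} [BEq α] [LawfulBEq α] (l : List α) (q : α → Bool) :
    PySem.Set.ofList (l.filter q) = (PySem.Set.ofList l).filter q := by
  induction l using List.reverseRecOn with
  | nil => simp [PySem.Set.ofList_nil]
  | append_singleton xs x ih =>
    rw [List.filter_append, PySem.Set.ofList_append_singleton]
    by_cases hq : q x
    · simp only [List.filter_cons, hq, if_true, List.filter_nil]
      rw [PySem.Set.ofList_append_singleton]
      by_cases hm : x ∈ xs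
      · have hmem : x ∈ PySem.Set.ofList (List.filter q xs) := by
          rw [PySem.Set.mem_ofList, List.mem_filter]; exact ⟨hm, hq⟩
        rw [PySem.Set.add_of_mem hmem,
            PySem.Set.add_of_mem (by simp [PySem.Set.mem_ofList, hm]), ih]
      · rw [PySem.Set.add_of_not_mem (by simp [PySem.Set.mem_ofList, List.mem_filter, hm]),
            PySem.Set.add_of_not_mem (by simp [PySem.Set.mem_ofList, hm]),
            List.filter_append, ih]
        simp [List.filter_cons, hq]
    · simp only [List.filter_cons, hq, Bool.false_eq_true, if_false, List.filter_nil,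
        List.append_nil]
      by_cases hm : x ∈ xs
      · rw [PySem.Set.add_of_mem (by simp [PySem.Set.mem_ofList, hm]), ih]
      · rw [PySem.Set.add_of_not_mem (by simp [PySem.Set.mem_ofList, hm]), List.filter_append, ih]
        simp [List.filter_cons, hq]

lemma pvOfList_map {α β : Type} [BEq α] [LawfulBEq α] [BEq β] [LawfulBEq β] (l : List α) (f : α → β)
    (hf : ∀ x ∈ l, ∀ y ∈ l, f x = f y → x = y) :
    PySem.Set.ofList (l.map f) = (PySem.Set.ofList l).map f := by
  induction l using List.reverseRecOn with
  | nil => simp [PySem.Set.ofList_nil]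
  | append_singleton xs x ih =>
    have hf' : ∀ y ∈ xs, ∀ z ∈ xs, f y = f z → y = z := fun y hy z hz =>
      hf y (by simp [hy]) z (by simp [hz])
    rw [List.map_append, List.map_singleton, PySem.Set.ofList_append_singleton,
        PySem.Set.ofList_append_singleton, ih hf']
    by_cases hm : x ∈ xs
    · rw [PySem.Set.add_of_mem (List.mem_map_of_mem (by simp [PySem.Set.mem_ofList, hm])),
        PySem.Set.add_of_mem (by simp [PySem.Set.mem_ofList, hm])]
    · have hfm : f x ∉ List.map f (PySem.Set.ofList xs) := by
        rw [List.mem_map]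
        rintro ⟨y, hy, hxy⟩
        have hy' : y ∈ xs := by simpa [PySem.Set.mem_ofList] using hy
        exact hm (hf x (by simp) y (by simp [hy']) hxy.symm ▸ hy')
      rw [PySem.Set.add_of_not_mem hfm,
          PySem.Set.add_of_not_mem (by simp [PySem.Set.mem_ofList, hm]),
          List.map_append, List.map_singleton]

lemma pvOfList_map_ofList {α β : Type} [BEq α] [LawfulBEq α] [BEq β] [LawfulBEq β] (l : List α) (f : α → β) :
    PySem.Set.ofList (l.map f) = PySem.Set.ofList ((PySem.Set.ofList l).map f) := by
  induction l using List.reverseRecOn with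
  | nil => simp [PySem.Set.ofList_nil]
  | append_singleton xs x ih =>
    rw [List.map_append, List.map_singleton, PySem.Set.ofList_append_singleton,
        PySem.Set.ofList_append_singleton, ih]
    by_cases hm : x ∈ xs
    · have h2 : (PySem.Set.ofList xs).add x = PySem.Set.ofList xs :=
        PySem.Set.add_of_mem (by simp [PySem.Set.mem_ofList, hm])
      have h1 : f x ∈ PySem.Set.ofList (List.map f (PySem.Set.ofList xs)) := by
        simp only [PySem.Set.mem_ofList, List.mem_map]
        exact ⟨x, by simp [PySem.Set.mem_ofList, hm], rfl⟩
      rw [h2, PySem.Set.add_of_mem h1]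
    · have h2 : (PySem.Set.ofList xs).add x = PySem.Set.ofList xs ++ [x] :=
        PySem.Set.add_of_not_mem (by simp [PySem.Set.mem_ofList, hm])
      rw [h2, List.map_append, List.map_singleton, PySem.Set.ofList_append_singleton]

lemma pvCount (ps : List (Int × Int)) (s d : Int) :
    ((ps.filter (fun p => p.1 == s)).map Prod.snd).count d = ps.count (s, d) := by
  induction ps with
  | nil => simp
  | cons p ps ih =>
    by_cases h1 : p.1 = s
    · by_cases h2 : p.2 = d
      · have : p = (s, d) := by cases p; simp_all
        simp [List.filter_cons, List.count_cons, h1, this, ih]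
      · have : p ≠ (s, d) := by cases p; simp_all
        simp [List.filter_cons, List.count_cons, h1, h2, this, ih]
    · have : p ≠ (s, d) := by cases p; simp_all
      simp [List.filter_cons, List.count_cons, h1, this, ih]

lemma pvInnerA (ps : List (Int × Int)) (s : Int) :
    (ps.foldl pvBump PySem.Dict.empty).getD s PySem.Dict.empty
      = PySem.Dict.counter ((ps.filter (fun p => p.1 == s)).map Prod.snd) := by
  have h := pvGetD_foldl_insert_key (l := ps) (key := Prod.fst)
    (g := fun (inn : PySem.Dict Int Int) (p : Int × Int) => inn.insert p.2 (inn.getD p.2 0 + 1))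
    (d := (PySem.Dict.empty : PySem.Dict Int (PySem.Dict Int Int))) (v0 := PySem.Dict.empty) (s := s)
  have hdef : List.foldl pvBump PySem.Dict.empty ps
      = List.foldl (fun (c : PySem.Dict Int (PySem.Dict Int Int)) (x : Int × Int) =>
          c.insert x.1 ((c.getD x.1 PySem.Dict.empty).insert x.2
            ((c.getD x.1 PySem.Dict.empty).getD x.2 0 + 1))) PySem.Dict.empty ps := rfl
  rw [hdef]
  refine h.trans ?_
  rw [PySem.Dict.getD_empty,
    ← List.foldl_map (f := Prod.snd)
      (g := fun (inn : PySem.Dict Int Int) x => inn.insert x (inn.getD x 0 + 1)),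
    PySem.Dict.foldl_insert_getD_add_one_eq_counter]

lemma pvInnerB_items (ps : List (Int × Int)) (s : Int) :
    ((((PySem.Dict.counter ps : PySem.Dict (Int × Int) Int)).items.foldl pvReg
        PySem.Dict.empty).getD s PySem.Dict.empty).items
      = ((PySem.Set.ofList ps).filter (fun k => k.1 == s)).map
          (fun k => (k.2, (ps.count k : Int))) := by
  have h := pvGetD_foldl_insert_key (l := (PySem.Dict.counter ps : PySem.Dict (Int × Int) Int).items)
    (key := fun x => x.1.1)
    (g := fun (inn : PySem.Dict Int Int) (x : (Int × Int) × Int) => inn.insert x.1.2 x.2)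
    (d := (PySem.Dict.empty : PySem.Dict Int (PySem.Dict Int Int))) (v0 := PySem.Dict.empty) (s := s)
  have hdef : List.foldl pvReg PySem.Dict.empty (PySem.Dict.counter ps : PySem.Dict (Int × Int) Int).items
      = List.foldl (fun (c : PySem.Dict Int (PySem.Dict Int Int)) (x : (Int × Int) × Int) =>
          c.insert x.1.1 ((c.getD x.1.1 PySem.Dict.empty).insert x.1.2 x.2)) PySem.Dict.empty
          (PySem.Dict.counter ps : PySem.Dict (Int × Int) Int).items := rfl
  rw [hdef, h, PySem.Dict.getD_empty, PySem.Dict.items_counter]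
  rw [List.filter_map]
  have hcomp : (List.filter ((fun (x : (Int × Int) × Int) => x.1.1 == s) ∘
        fun k => (k, (ps.count k : Int))) (PySem.Set.ofList ps))
      = List.filter (fun k => k.1 == s) (PySem.Set.ofList ps) := rfl
  rw [hcomp]
  have hmnd : (List.filter (fun k => k.1 == s) (PySem.Set.ofList ps)).Nodup :=
    (PySem.Set.nodup_ofList ps).filter _
  have hinj : ∀ x ∈ List.filter (fun k => k.1 == s) (PySem.Set.ofList ps),
      ∀ y ∈ List.filter (fun k => k.1 == s) (PySem.Set.ofList ps), x.2 = y.2 → x = y := by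
    intro x hx y hy hxy
    have hxs : x.1 = s := by simpa using (List.mem_filter.mp hx).2
    have hys : y.1 = s := by simpa using (List.mem_filter.mp hy).2
    cases x; cases y; simp_all
  have hfr := PySem.Dict.items_foldl_insert_fresh
    (l := (List.filter (fun k => k.1 == s) (PySem.Set.ofList ps)).map
      (fun k => ((k, (ps.count k : Int)) : (Int × Int) × Int)))
    (k := fun a => a.1.2) (v := fun a => a.2)
    (d := (PySem.Dict.empty : PySem.Dict Int Int))
    (by intro a _; exact PySem.Dict.contains_empty _)
    (by rw [List.map_map]
        exact List.Nodup.map_on (fun x hx y hy h => hinj x hx y hy h) hmnd)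
  rw [hfr]
  simp [List.map_map, Function.comp_def]
  rfl

lemma pvInnerA_items (ps : List (Int × Int)) (s : Int) :
    ((ps.foldl pvBump PySem.Dict.empty).getD s PySem.Dict.empty).items
      = ((PySem.Set.ofList ps).filter (fun k => k.1 == s)).map
          (fun k => (k.2, (ps.count k : Int))) := by
  rw [pvInnerA, PySem.Dict.items_counter]
  have hinj : ∀ x ∈ ps.filter (fun p => p.1 == s), ∀ y ∈ ps.filter (fun p => p.1 == s),
      Prod.snd x = Prod.snd y → x = y := by
    intro x hx y hy hxy
    have hxs : x.1 = s := by simpa using (List.mem_filter.mp hx).2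
    have hys : y.1 = s := by simpa using (List.mem_filter.mp hy).2
    cases x; cases y; simp_all
  have hset : PySem.Set.ofList ((ps.filter (fun p => p.1 == s)).map Prod.snd)
      = ((PySem.Set.ofList ps).filter (fun k => k.1 == s)).map Prod.snd := by
    rw [pvOfList_map _ _ hinj, pvOfList_filter]
  rw [hset, List.map_map]
  apply List.map_congr_left
  intro k hk
  have hks : k.1 = s := by simpa using (List.mem_filter.mp hk).2
  simp only [Function.comp_def]
  rw [pvCount]
  have : (s, k.2) = k := by cases k; simp_all
  rw [this]

theorem pv_main (a : List Int) : build_transition_counts a = build_transition_counts_alt a := by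
  rw [pvA_fold, pvB_fold]
  set ps := a.zip (a.drop 1) with hps
  have hdefA : List.foldl pvBump PySem.Dict.empty ps
      = List.foldl (fun (c : PySem.Dict Int (PySem.Dict Int Int)) (x : Int × Int) =>
          c.insert x.1 ((c.getD x.1 PySem.Dict.empty).insert x.2
            ((c.getD x.1 PySem.Dict.empty).getD x.2 0 + 1))) PySem.Dict.empty ps := rfl
  have hdefB : List.foldl pvReg PySem.Dict.empty (PySem.Dict.counter ps : PySem.Dict (Int × Int) Int).items
      = List.foldl (fun (c : PySem.Dict Int (PySem.Dict Int Int)) (x : (Int × Int) × Int) =>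
          c.insert x.1.1 ((c.getD x.1.1 PySem.Dict.empty).insert x.1.2 x.2)) PySem.Dict.empty
          (PySem.Dict.counter ps : PySem.Dict (Int × Int) Int).items := rfl
  have ndA : (List.foldl pvBump PySem.Dict.empty ps).keys.Nodup := by
    rw [hdefA]
    exact PySem.Dict.nodup_keys_foldl_insert_key _ _ _ _ (by simp [PySem.Dict.keys_empty])
  have ndB : (List.foldl pvReg PySem.Dict.empty
      (PySem.Dict.counter ps : PySem.Dict (Int × Int) Int).items).keys.Nodup := by
    rw [hdefB]
    exact PySem.Dict.nodup_keys_foldl_insert_key _ _ _ _ (by simp [PySem.Dict.keys_empty])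
  have keysA : (List.foldl pvBump PySem.Dict.empty ps).keys = PySem.Set.ofList (ps.map Prod.fst) := by
    rw [hdefA, PySem.Dict.keys_foldl_insert_key, PySem.Dict.keys_empty,
        PySem.Set.update_nil_left]
  have keysB : (List.foldl pvReg PySem.Dict.empty
        (PySem.Dict.counter ps : PySem.Dict (Int × Int) Int).items).keys
      = PySem.Set.ofList (ps.map Prod.fst) := by
    rw [hdefB, PySem.Dict.keys_foldl_insert_key, PySem.Dict.keys_empty,
        PySem.Set.update_nil_left, PySem.Dict.items_counter, List.map_map]
    have hc : ((fun (x : (Int × Int) × Int) => x.1.1) ∘ fun k => (k, (ps.count k : Int)))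
        = Prod.fst := by funext k; rfl
    rw [hc, ← pvOfList_map_ofList]
  rw [PySem.Dict.items_eq_map_keys _ ndA PySem.Dict.empty,
      PySem.Dict.items_eq_map_keys _ ndB PySem.Dict.empty,
      keysA, keysB, List.map_map, List.map_map]
  apply List.map_congr_left
  intro k _
  simp only [Function.comp_def]
  rw [pvInnerA_items, pvInnerB_items]

-- ===== VERDICT (by name: the statement is the Claim_ definition above) =====
theorem build_transition_counts_spec : Claim_equal_build_transition_counts := by
  intro a _
  unfold Spec_build_transition_counts
  exact pv_main a
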